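-- pv_equiv track=rewrite | github.com/maxicm7/ql2 | ql2.py | analizar_suma_especial_probabilidad
-- ===== SOURCE A (Python) =====
-- from collections import Counter
--
-- def analizar_suma_especial_probabilidad(resultados, numero_a_atraso, total_atraso_dataset):
--     """Analiza los resultados de la Etapa 1 para encontrar el 'Cálculo Especial' más frecuente."""
--     if not resultados or not numero_a_atraso or total_atraso_dataset is None: return None
--     suma_especial_counts = Counter()
--     total_combinaciones_generadas = sum(freq for res_proceso in resultados for _, (freq, _) in res_proceso)
--
--     if total_combinaciones_generadas == 0: return None
--
--     for res_proceso in resultados: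
--         for combinacion, (frecuencia, _) in res_proceso:
--             suma_atrasos = sum(numero_a_atraso.get(val, 0) for val in combinacion)
--             valor_especial = total_atraso_dataset + 40 - suma_atrasos
--             suma_especial_counts[valor_especial] += frecuencia
--
--     return suma_especial_counts, total_combinaciones_generadas
-- ===== SOURCE B (Python) =====
-- def analizar_suma_especial_probabilidad(resultados, numero_a_atraso, total_atraso_dataset):
--     """Flatten to (valor_especial, frecuencia) pairs, then group: per distinct key
--     (first-occurrence order, as dict.fromkeys) sum its frequencies."""
--     if not resultados or not numero_a_atraso or total_atraso_dataset is None: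
--         return None
--     base = total_atraso_dataset + 40
--     pares = [(base - sum(numero_a_atraso.get(v, 0) for v in comb), freq)
--              for res_proceso in resultados
--              for comb, (freq, _) in res_proceso]
--     total = sum(f for _, f in pares)
--     if total == 0:
--         return None
--     claves = list(dict.fromkeys(k for k, _ in pares))
--     counts = {k: sum(f for kk, f in pares if kk == k) for k in claves}
--     return counts, total
-- ===== Notes on version B (the rewrite author's own statement) =====
-- stated objective: alternative
-- what changed: A incrementally updates a Counter (and pre-computes the total in a separate traversal); B flattens everything into a list of (valor_especial, frecuencia) pairs, takes the total as the sum over that flat list, and builds the result by group-by: distinct keys in first-occurrence order (dict.fromkeys) each mapped to the sum of its matching pair frequencies.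
import Mathlib
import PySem

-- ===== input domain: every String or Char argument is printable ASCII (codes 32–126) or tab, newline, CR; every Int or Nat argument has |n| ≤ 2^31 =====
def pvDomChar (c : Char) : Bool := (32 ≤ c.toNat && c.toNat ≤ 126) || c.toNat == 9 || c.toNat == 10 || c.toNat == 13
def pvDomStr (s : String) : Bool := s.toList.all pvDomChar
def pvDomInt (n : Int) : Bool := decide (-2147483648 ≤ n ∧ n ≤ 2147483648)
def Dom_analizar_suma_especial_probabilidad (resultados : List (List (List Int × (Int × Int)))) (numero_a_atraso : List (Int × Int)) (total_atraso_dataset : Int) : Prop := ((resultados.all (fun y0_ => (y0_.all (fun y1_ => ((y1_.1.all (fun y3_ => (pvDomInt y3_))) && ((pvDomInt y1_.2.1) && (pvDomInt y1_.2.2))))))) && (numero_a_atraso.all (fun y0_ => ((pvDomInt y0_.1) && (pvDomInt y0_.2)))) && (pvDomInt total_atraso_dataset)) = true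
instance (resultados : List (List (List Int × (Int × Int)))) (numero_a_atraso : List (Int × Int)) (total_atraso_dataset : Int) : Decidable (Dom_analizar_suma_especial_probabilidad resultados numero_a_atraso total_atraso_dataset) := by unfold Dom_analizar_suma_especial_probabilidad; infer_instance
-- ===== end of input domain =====

-- B replaces A's incremental Counter loop by flatten-then-group-by: flatten to
-- (key, freq) pairs, then map each distinct key (first-occurrence order) to its
-- filtered frequency sum (objective: alternative decomposition; not faster).


-- ===== PORT A =====
-- A: guard; first full nested traversal summing frequencies; if 0 return none;
-- second nested traversal building the Counter by d[k] += freq; (counter, total).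
def analizar_suma_especial_probabilidad (resultados : List (List (List Int × (Int × Int)))) (numero_a_atraso : List (Int × Int)) (total_atraso_dataset : Int) : Option ((List (Int × Int)) × Int) :=
  if resultados = [] ∨ numero_a_atraso = [] then none
  else
    let total_combinaciones_generadas : Int :=
      resultados.foldl (fun acc res_proceso =>
        res_proceso.foldl (fun a e => a + e.2.1) acc) 0
    if total_combinaciones_generadas = 0 then none
    else
      let counts : PySem.Dict Int Int :=
        resultados.foldl (fun d res_proceso =>
          res_proceso.foldl (fun d e =>
            let suma_atrasos : Int :=
              e.1.foldl (fun s val => s + (PySem.Dict.mk numero_a_atraso).getD val 0) 0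
            let valor_especial := total_atraso_dataset + 40 - suma_atrasos
            d.modify valor_especial 0 (· + e.2.1)) d) PySem.Dict.empty
      some (counts.items, total_combinaciones_generadas)

-- ===== PORT B =====
-- B: guard; flatten everything into pares : List (valor_especial × frecuencia);
-- total = sum of the second components; distinct keys via dict.fromkeys (PySem.List.dedup);
-- the result dict maps each distinct key to the sum of the matching pares frequencies.
def analizar_suma_especial_probabilidad_alt (resultados : List (List (List Int × (Int × Int)))) (numero_a_atraso : List (Int × Int)) (total_atraso_dataset : Int) : Option ((List (Int × Int)) × Int) :=
  if resultados = [] ∨ numero_a_atraso = [] then none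
  else
    let base := total_atraso_dataset + 40
    let pares : List (Int × Int) :=
      resultados.flatMap (fun res_proceso =>
        res_proceso.map (fun e =>
          (base - e.1.foldl (fun s v => s + (PySem.Dict.mk numero_a_atraso).getD v 0) 0, e.2.1)))
    let total : Int := (pares.map (·.2)).sum
    if total = 0 then none
    else
      let claves := PySem.List.dedup (pares.map (·.1))
      let counts : List (Int × Int) :=
        claves.map (fun k => (k, ((pares.filter (fun p => p.1 == k)).map (·.2)).sum))
      some (counts, total)

-- ===== PRECONDITION & SPEC =====
def Spec_analizar_suma_especial_probabilidad (resultados : List (List (List Int × (Int × Int)))) (numero_a_atraso : List (Int × Int)) (total_atraso_dataset : Int) (out : Option ((List (Int × Int)) × Int)) : Prop := out = analizar_suma_especial_probabilidad_alt resultados numero_a_atraso total_atraso_dataset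
instance (resultados : List (List (List Int × (Int × Int)))) (numero_a_atraso : List (Int × Int)) (total_atraso_dataset : Int) (out : Option ((List (Int × Int)) × Int)) : Decidable (Spec_analizar_suma_especial_probabilidad resultados numero_a_atraso total_atraso_dataset out) := by unfold Spec_analizar_suma_especial_probabilidad; infer_instance

-- ===== CLAIM (what is proved, stated in full; the proofs are below) =====
def Claim_equal_analizar_suma_especial_probabilidad : Prop := ∀ (resultados : List (List (List Int × (Int × Int)))) (numero_a_atraso : List (Int × Int)) (total_atraso_dataset : Int), Dom_analizar_suma_especial_probabilidad resultados numero_a_atraso total_atraso_dataset → Spec_analizar_suma_especial_probabilidad resultados numero_a_atraso total_atraso_dataset (analizar_suma_especial_probabilidad resultados numero_a_atraso total_atraso_dataset)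

-- ===== LEMMAS AND PROOFS =====

-- Nested foldl over a list of lists = foldl over the flattened list.
theorem pvFoldFlat {α δ : Type} (f : δ → α → δ) (L : List (List α)) (i : δ) :
    (L.flatMap id).foldl f i = L.foldl (fun acc l => l.foldl f acc) i := by
  induction L generalizing i with
  | nil => rfl
  | cons h t ih => simp only [List.flatMap_cons, id, List.foldl_append, List.foldl_cons]; exact ih _

-- Weighted counting loop: the value at v after folding d[p.1] += p.2 over l.
theorem pvGetDWeighted (l : List (Int × Int)) (d : PySem.Dict Int Int) (v : Int) :
    (l.foldl (fun d p => d.modify p.1 0 (· + p.2)) d).getD v 0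
      = d.getD v 0 + ((l.filter (fun p => p.1 == v)).map (·.2)).sum := by
  induction l generalizing d with
  | nil => simp
  | cons p t ih =>
      simp only [List.foldl_cons, ih, List.filter_cons]
      rw [PySem.Dict.getD_modify]
      by_cases h : p.1 = v
      · simp [h]; ring
      · simp [h, Ne.symm h]

-- Items of the weighted counting loop from empty: each distinct key (first
-- occurrence order) paired with its weighted sum.
theorem pvItemsWeighted (l : List (Int × Int)) :
    (l.foldl (fun d p => d.modify p.1 0 (· + p.2)) PySem.Dict.empty).items
      = (PySem.List.dedup (l.map (·.1))).map
          (fun k => (k, ((l.filter (fun p => p.1 == k)).map (·.2)).sum)) := by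
  have hnd : (l.foldl (fun d p => d.modify p.1 0 (· + p.2)) PySem.Dict.empty).keys.Nodup := by
    exact PySem.Dict.nodup_keys_foldl_modify_key l (·.1) 0 (fun _ p => (· + p.2)) PySem.Dict.empty
      (by simp)
  have hkeys : (l.foldl (fun d p => d.modify p.1 0 (· + p.2)) PySem.Dict.empty).keys
      = PySem.List.dedup (l.map (·.1)) := by
    rw [PySem.Dict.keys_foldl_modify_key]
    simp [PySem.Set.update_nil_left]
  rw [PySem.Dict.items_eq_map_keys _ hnd 0, hkeys]
  apply List.map_congr_left
  intro k _
  rw [pvGetDWeighted]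
  simp

theorem analizar_agree (resultados : List (List (List Int × (Int × Int)))) (numero_a_atraso : List (Int × Int)) (total_atraso_dataset : Int) :
    analizar_suma_especial_probabilidad resultados numero_a_atraso total_atraso_dataset
      = analizar_suma_especial_probabilidad_alt resultados numero_a_atraso total_atraso_dataset := by
  unfold analizar_suma_especial_probabilidad analizar_suma_especial_probabilidad_alt
  by_cases h : resultados = [] ∨ numero_a_atraso = []
  · simp [h]
  · simp only [if_neg h]
    -- entry -> (key, freq)
    set g : (List Int × (Int × Int)) → Int × Int := fun e =>
      (total_atraso_dataset + 40 - e.1.foldl (fun s v => s + (PySem.Dict.mk numero_a_atraso).getD v 0) 0, e.2.1) with hg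
    have hpar : resultados.flatMap (fun res_proceso => res_proceso.map g)
        = (resultados.flatMap id).map g := by
      simp [List.flatMap_def, List.map_flatten]
    -- totals agree
    have htot : ((resultados.flatMap (fun res_proceso => res_proceso.map g)).map (·.2)).sum
        = resultados.foldl (fun acc res_proceso => res_proceso.foldl (fun a e => a + e.2.1) acc) 0 := by
      rw [hpar, ← pvFoldFlat (fun a e => a + e.2.1) resultados 0,
        List.sum_eq_foldl, List.foldl_map, List.foldl_map]
    -- counters agree
    have hcnt : (resultados.foldl (fun d res_proceso =>
          res_proceso.foldl (fun d e => d.modify (g e).1 0 (· + (g e).2)) d) PySem.Dict.empty).items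
        = ((resultados.flatMap (fun r => r.map g)).foldl
            (fun d p => d.modify p.1 0 (· + p.2)) PySem.Dict.empty).items := by
      rw [hpar, List.foldl_map,
        pvFoldFlat (fun (d : PySem.Dict Int Int) (e : List Int × (Int × Int)) =>
          d.modify (g e).1 0 (· + (g e).2)) resultados]
    rw [← htot]
    by_cases h0 : ((resultados.flatMap (fun res_proceso => res_proceso.map g)).map (·.2)).sum = 0
    · simp [h0]
    · simp only [if_neg h0]
      congr 1
      congr 1
      calc (resultados.foldl (fun d res_proceso =>
            res_proceso.foldl (fun d e => d.modify (g e).1 0 (· + (g e).2)) d) PySem.Dict.empty).items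
          = _ := hcnt
        _ = _ := pvItemsWeighted _

-- ===== VERDICT (by name: the statement is the Claim_ definition above) =====
theorem analizar_suma_especial_probabilidad_spec : Claim_equal_analizar_suma_especial_probabilidad := by
  intro r na t _
  unfold Spec_analizar_suma_especial_probabilidad
  exact analizar_agree r na t
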